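-- pv_equiv track=rewrite | github.com/Jiyesss/AlgorithmStudy_summer | 1174.줄어드는 수.py | decrease
-- ===== SOURCE A (Python) =====
-- def decrease(integer):
--     integer = str(integer) # String으로 변환
--
--     # 1의 자리인 경우 -> 줄어드는 수
--     if len(integer) == 1:
--         return True
--
--     # 1의 자리가 아닌 경우
--     else:
--         for i in range(len(integer)-1):
--
--             if integer[i] <= integer[i+1]: # 줄어드는 수가 아닌 경우
--                 return False
--
--     return True
-- ===== SOURCE B (Python) =====
-- def decrease(integer):
--     s = str(integer)
--     return list(s) == sorted(s, reverse=True) and len(set(s)) == len(s)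
-- ===== Notes on version B (the rewrite author's own statement) =====
-- stated objective: idiomatic
-- what changed: Replaces the indexed adjacent-pair loop with early return by a single comparison of the digit string against its descending sort plus an all-distinct check (len(set)==len).
import Mathlib
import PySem

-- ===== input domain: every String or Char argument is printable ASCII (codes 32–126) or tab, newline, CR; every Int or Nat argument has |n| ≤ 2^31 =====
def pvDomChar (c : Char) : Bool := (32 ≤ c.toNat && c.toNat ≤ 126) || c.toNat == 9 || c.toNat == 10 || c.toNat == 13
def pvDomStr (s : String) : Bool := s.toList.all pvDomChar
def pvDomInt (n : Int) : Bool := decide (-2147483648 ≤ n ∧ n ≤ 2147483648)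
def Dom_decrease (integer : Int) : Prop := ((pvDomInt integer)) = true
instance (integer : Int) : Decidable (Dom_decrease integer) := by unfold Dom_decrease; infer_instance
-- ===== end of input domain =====

-- B replaces A's adjacent-pair index loop by a single comparison with the descending sort plus a
-- distinctness check (objective: alternative/idiomatic; not claimed faster).

-- ===== PORT A =====
-- the 'for i in range(len(integer)-1)' loop with its early 'return False'
def decreaseLoop (s : List Char) : List Int → Bool
  | [] => true
  | i :: rest =>
    match PySem.List.pyGet? s i, PySem.List.pyGet? s (i + 1) with
    | some a, some b => if a ≤ b then false else decreaseLoop s rest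
    | _, _ => true   -- unreachable: every index of the range is in bounds

def decrease (integer : Int) : Bool :=
  let s := (PySem.Int.toStr integer).toList
  if s.length == 1 then true
  else decreaseLoop s (PySem.List.pyRange 0 ((s.length : Int) - 1) 1)

-- ===== PORT B =====
def decrease_alt (integer : Int) : Bool :=
  let s := (PySem.Int.toStr integer).toList
  (s == PySem.List.sorted s (fun c => c) true)
    && (PySem.Set.len (PySem.Set.ofList s) == (s.length : Int))

-- ===== PRECONDITION & SPEC =====
def Spec_decrease (integer : Int) (out : Bool) : Prop := out = decrease_alt integer
instance (integer : Int) (out : Bool) : Decidable (Spec_decrease integer out) := by unfold Spec_decrease; infer_instance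

-- ===== CLAIM (what is proved, stated in full; the proofs are below) =====
def Claim_equal_decrease : Prop := ∀ (integer : Int), Dom_decrease integer → Spec_decrease integer (decrease integer)

-- ===== LEMMAS AND PROOFS =====

-- Set.ofList (= foldl add acc) appends a sublist of its input after the accumulator.
theorem pv_foldl_add_sublist {α : Type} [BEq α] (xs : List α) :
    ∀ acc : List α, ∃ ys, List.foldl PySem.Set.add acc xs = acc ++ ys ∧ ys.Sublist xs := by
  induction xs with
  | nil => intro acc; exact ⟨[], by simp, List.Sublist.refl _⟩
  | cons x xs ih =>
    intro acc
    simp only [List.foldl_cons]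
    by_cases hx : PySem.Set.contains acc x = true
    · have hadd : PySem.Set.add acc x = acc := by unfold PySem.Set.add; rw [if_pos hx]
      obtain ⟨ys, h1, h2⟩ := ih acc
      exact ⟨ys, by rw [hadd]; exact h1, h2.cons x⟩
    · have hadd : PySem.Set.add acc x = acc ++ [x] := by unfold PySem.Set.add; rw [if_neg hx]
      obtain ⟨ys, h1, h2⟩ := ih (acc ++ [x])
      exact ⟨x :: ys, by rw [hadd]; simpa using h1, h2.cons₂ x⟩

theorem pv_foldl_add_of_nodup {α : Type} [BEq α] [LawfulBEq α] (xs : List α) :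
    ∀ acc : List α, (∀ x ∈ xs, x ∉ acc) → xs.Nodup →
      List.foldl PySem.Set.add acc xs = acc ++ xs := by
  induction xs with
  | nil => intro acc _ _; simp
  | cons x xs ih =>
    intro acc hacc hnd
    simp only [List.foldl_cons]
    rw [PySem.Set.add_of_not_mem (hacc x (by simp))]
    rw [ih (acc ++ [x]) ?_ hnd.of_cons]
    · simp
    · intro y hy
      simp only [List.mem_append, List.mem_singleton]
      rintro (h | rfl)
      · exact hacc y (by simp [hy]) h
      · exact (List.nodup_cons.mp hnd).1 hy

-- len(set(s)) == len(s)  ↔  s has no duplicates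
theorem pv_set_len_iff_nodup (l : List Char) :
    (PySem.Set.len (PySem.Set.ofList l) == (l.length : Int)) = true ↔ l.Nodup := by
  have hlen : (PySem.Set.len (PySem.Set.ofList l) == (l.length : Int)) = true ↔
      (PySem.Set.ofList l : List Char).length = l.length := by
    rw [beq_iff_eq, PySem.Set.len]
    exact_mod_cast Iff.rfl
  rw [hlen]
  obtain ⟨ys, h1, h2⟩ := pv_foldl_add_sublist l ([] : List Char)
  have hof : (PySem.Set.ofList l : List Char) = ys := by
    simpa [PySem.Set.ofList, PySem.Set.empty] using h1
  constructor
  · intro h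
    have hys : ys = l := h2.eq_of_length (by rw [← hof]; exact h)
    rw [← hof, ← hys] at *
    exact PySem.Set.nodup_ofList l
  · intro h
    have : (PySem.Set.ofList l : List Char) = l := by
      simpa [PySem.Set.ofList, PySem.Set.empty] using
        pv_foldl_add_of_nodup l [] (by simp) h
    rw [this]


-- s == sorted(s, reverse=True) and all-distinct  ↔  strictly decreasing (Pairwise)
theorem pv_alt_iff_pairwise (l : List Char) :
    ((l == PySem.List.sorted l (fun c => c) true)
      && (PySem.Set.len (PySem.Set.ofList l) == (l.length : Int))) = true
      ↔ l.Pairwise (fun a b => b < a) := by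
  rw [Bool.and_eq_true, beq_iff_eq, pv_set_len_iff_nodup]
  constructor
  · rintro ⟨hs, hnd⟩
    have hle : l.Pairwise (fun a b : Char => b ≤ a) := by
      have := PySem.List.sorted_pairwise_rev l (fun c : Char => c)
      rwa [← hs] at this
    have hne : l.Pairwise (fun a b : Char => a ≠ b) := List.nodup_iff_pairwise_ne.mp hnd
    exact (hle.and hne).imp (fun h => lt_of_le_of_ne h.1 (Ne.symm h.2))
  · intro hp
    refine ⟨(PySem.List.sorted_rev_eq_of_perm_of_pairwise_gt l l (fun c => c)
        (List.Perm.refl l) hp).symm, ?_⟩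
    exact List.nodup_iff_pairwise_ne.mpr (hp.imp fun h => ne_of_gt h)

-- the loop, over a list of in-bounds indices
theorem pv_loop_iff (l : List Char) (idxs : List Nat)
    (hb : ∀ i ∈ idxs, i + 1 < l.length) :
    decreaseLoop l (List.map (fun k : Nat => (k : Int)) idxs) = true ↔
      ∀ i ∈ idxs, ∀ (h : i + 1 < l.length), l[i + 1] < l[i] := by
  induction idxs with
  | nil =>
    simp only [List.map_nil]
    simp [decreaseLoop]
  | cons i rest ih =>
    have hi1 : i + 1 < l.length := hb i (by simp)
    have hg1 : PySem.List.pyGet? l (i : Int) = some l[i] :=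
      PySem.List.pyGet?_ofNat l i (by omega)
    have hg2 : PySem.List.pyGet? l ((i : Int) + 1) = some l[i + 1] := by
      have : ((i : Int) + 1) = ((i + 1 : Nat) : Int) := by push_cast; ring
      rw [this]; exact PySem.List.pyGet?_ofNat l (i + 1) hi1
    simp only [List.map_cons, decreaseLoop, hg1, hg2]
    by_cases hle : l[i] ≤ l[i + 1]
    · simp only [if_pos hle]
      constructor
      · intro h; exact absurd h (by simp)
      · intro h
        exact absurd (h i (by simp) hi1) (not_lt.mpr hle)
    · simp only [if_neg hle]
      rw [ih (fun j hj => hb j (by simp [hj]))]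
      constructor
      · intro h j hj hjl
        rcases List.mem_cons.mp hj with rfl | hj'
        · exact lt_of_not_ge hle
        · exact h j hj' hjl
      · intro h j hj hjl; exact h j (by simp [hj]) hjl

-- A's result on a string of length ≥ 1 (the else branch), as a Pairwise statement
theorem pv_a_iff_pairwise (l : List Char) (hne : l ≠ []) :
    decreaseLoop l (PySem.List.pyRange 0 ((l.length : Int) - 1) 1) = true ↔
      l.Pairwise (fun a b => b < a) := by
  have hlen : 1 ≤ l.length := List.length_pos_iff.mpr hne
  have hcast : ((l.length : Int) - 1) = ((l.length - 1 : Nat) : Int) := by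
    push_cast [hlen]; ring
  rw [hcast, PySem.List.pyRange_zero_natCast,
    pv_loop_iff l (List.range (l.length - 1)) (fun i hi => by
      have := List.mem_range.mp hi; omega)]
  haveI : IsTrans Char (fun a b : Char => b < a) :=
    ⟨fun _ _ _ h1 h2 => lt_trans h2 h1⟩
  rw [← List.isChain_iff_pairwise, List.isChain_iff_getElem]
  constructor
  · intro h i hil
    exact h i (List.mem_range.mpr (by omega)) hil
  · intro h i hi hil
    exact h i hil

-- the two bodies agree on every character list
theorem pv_main (l : List Char) :
    (if l.length == 1 then true
      else decreaseLoop l (PySem.List.pyRange 0 ((l.length : Int) - 1) 1))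
    = ((l == PySem.List.sorted l (fun c => c) true)
        && (PySem.Set.len (PySem.Set.ofList l) == (l.length : Int))) := by
  match l with
  | [] => decide
  | [a] =>
    rw [if_pos (by simp : (([a].length == 1) = true))]
    exact ((pv_alt_iff_pairwise [a]).mpr (by simp)).symm
  | a :: b :: t =>
    rw [if_neg (by simp)]
    by_cases hp : (a :: b :: t).Pairwise (fun x y : Char => y < x)
    · rw [(pv_a_iff_pairwise _ (by simp)).mpr hp,
        (pv_alt_iff_pairwise _).mpr hp]
    · have h1 := (not_iff_not.mpr (pv_a_iff_pairwise (a :: b :: t) (by simp))).mpr hp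
      have h2 := (not_iff_not.mpr (pv_alt_iff_pairwise (a :: b :: t))).mpr hp
      rw [Bool.not_eq_true] at h1 h2
      rw [h1, h2]

-- ===== VERDICT (by name: the statement is the Claim_ definition above) =====
theorem decrease_spec : Claim_equal_decrease := by
  intro integer _
  unfold Spec_decrease decrease decrease_alt
  exact pv_main _
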